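-- pv_equiv track=rewrite | github.com/alussana/python-programming-alessandro-lussana | string_matching_krogh/BWT.py | twb
-- ===== SOURCE A (Python) =====
-- def twb(b):
--     # count characters occurence and fm_index
--     char = []
--     occ = []
--     fm_index = []
--     for c in b:
--         if c not in char:
--             char.append(c)
--             occ.append(1)
--             fm_index.append(1)
--         else:
--             i = char.index(c)
--             occ[i] += 1
--             fm_index.append(occ[i])
--     char_count = dict(zip(char, occ))
--
--     # sort the char_count dictonary
--     sorted_char = sorted(char_count)
--     sorted_count = []
--     for v in sorted_char:
--         sorted_count.append(char_count[v])
--     char_count = dict(zip(sorted_char, sorted_count))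
--
--     # retrieve the original sequence
--     t = 0
--     s = []
--     for i in range(0, len(b) - 1):
--         s.append(b[t])
--         b_index = -1
--         x = 0
--         while b[t] != sorted_char[x]:
--             b_index += char_count[sorted_char[x]]
--             x += 1
--         b_index += fm_index[t]
--         t = b_index
--
--     # translate _ with \s
--     translated_s = []
--     for i in range(0, len(s)):
--         if s[i] != '_':
--             translated_s.append(s[i])
--         else:
--             translated_s.append(' ')
--
--     s= translated_s[::-1]
--     s = ''.join(s)
--
--     return(s)
-- ===== SOURCE B (Python) =====
-- def twb(b):
--     n = len(b)
--     # single pass: running counts and rank (occurrence number) of each position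
--     cnt = {}
--     rank = []
--     for c in b:
--         cnt[c] = cnt.get(c, 0) + 1
--         rank.append(cnt[c])
--     # C-array: for each character, number of characters strictly smaller in b
--     offset = {}
--     total = 0
--     for c in sorted(cnt):
--         offset[c] = total
--         total += cnt[c]
--     # LF-mapping walk, translating '_' on the fly
--     out = []
--     t = 0
--     for _ in range(n - 1):
--         c = b[t]
--         out.append(' ' if c == '_' else c)
--         t = offset[c] - 1 + rank[t]
--     return ''.join(reversed(out))
-- ===== Notes on version B (the rewrite author's own statement) =====
-- stated objective: faster
-- what changed: Replaces A's parallel char/occ lists with list.index membership scans and the per-step while-loop summation over the alphabet by a one-pass dict counter plus a precomputed cumulative-offset (C-array) dict, making each LF-mapping step O(1).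
import Mathlib
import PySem

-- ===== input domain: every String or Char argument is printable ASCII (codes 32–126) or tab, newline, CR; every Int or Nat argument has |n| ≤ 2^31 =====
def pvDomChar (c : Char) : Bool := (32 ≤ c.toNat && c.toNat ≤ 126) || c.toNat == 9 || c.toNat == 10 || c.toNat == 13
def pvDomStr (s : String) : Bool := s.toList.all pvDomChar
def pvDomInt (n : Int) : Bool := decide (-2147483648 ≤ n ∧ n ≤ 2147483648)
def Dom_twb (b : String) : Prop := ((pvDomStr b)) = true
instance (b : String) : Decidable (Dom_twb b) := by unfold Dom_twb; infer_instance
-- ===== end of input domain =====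

-- B replaces A's parallel char/occ lists (list.index scans) and A's per-step while-loop
-- summation over the alphabet by a one-pass counter dict plus a precomputed cumulative
-- offset (C-array) dict, so each LF-mapping step is a single lookup (objective: faster).

-- ===== PORT A =====
-- first pass of A: state (char, occ, fm_index); index? `none` branch unreachable (c ∈ char there)
def twbStep1 (st : List Char × List Int × List Int) (c : Char) : List Char × List Int × List Int :=
  let char := st.1; let occ := st.2.1; let fm := st.2.2
  if char.contains c = false then
    (char ++ [c], occ ++ [1], fm ++ [1])
  else
    match PySem.List.index? char c with
    | none => st
    | some i =>
      let v := occ.getD i 0 + 1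
      (char, occ.set i v, fm ++ [v])

def twbScan (cc : PySem.Dict Char Int) (c : Char) : List Char → Int → Int
  | [], acc => acc
  | k :: rest, acc => if c = k then acc else twbScan cc c rest (acc + cc.getD k 0)

def twbLoop (bl : List Char) (fm : List Int) (sc : List Char) (cc : PySem.Dict Char Int)
    (st : Int × List Char) (_ : Int) : Int × List Char :=
  let t := st.1; let s := st.2
  match PySem.List.pyGet? bl t with
  | none => st
  | some c =>
    let s' := s ++ [c]
    let bi := twbScan cc c sc (-1)
    match PySem.List.pyGet? fm t with
    | none => (t, s')
    | some f => (bi + f, s')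

def twb (b : String) : String :=
  let bl := b.toList
  let p := bl.foldl twbStep1 ([], [], [])
  let char := p.1; let occ := p.2.1; let fm := p.2.2
  let charCount : PySem.Dict Char Int := PySem.Dict.ofList (char.zip occ)
  let sortedChar := PySem.List.sorted charCount.keys (fun x => x) false
  let sortedCount := sortedChar.foldl (fun acc v => acc ++ [charCount.getD v 0]) []
  let charCount2 : PySem.Dict Char Int := PySem.Dict.ofList (sortedChar.zip sortedCount)
  let res := (PySem.List.pyRange 0 ((bl.length : Int) - 1) 1).foldl
    (twbLoop bl fm sortedChar charCount2) (0, [])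
  let s := res.2
  let translated := (PySem.List.pyRange 0 (s.length : Int) 1).foldl
    (fun acc i => if PySem.List.pyGetD s i ' ' ≠ '_' then acc ++ [PySem.List.pyGetD s i ' ']
                  else acc ++ [' ']) []
  String.ofList ((PySem.List.slice? translated none none (-1)).getD [])

-- ===== PORT B =====
def twbAltPass (st : PySem.Dict Char Int × List Int) (c : Char) :
    PySem.Dict Char Int × List Int :=
  let v := st.1.getD c 0 + 1
  (st.1.insert c v, st.2 ++ [v])

def twbAltOff (cnt : PySem.Dict Char Int) (st : PySem.Dict Char Int × Int) (c : Char) :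
    PySem.Dict Char Int × Int :=
  (st.1.insert c st.2, st.2 + cnt.getD c 0)

def twbAltLoop (bl : List Char) (rank : List Int) (off : PySem.Dict Char Int)
    (st : Int × List Char) (_ : Int) : Int × List Char :=
  let t := st.1; let out := st.2
  match PySem.List.pyGet? bl t with
  | none => st
  | some c =>
    let out' := out ++ [if c = '_' then ' ' else c]
    match PySem.List.pyGet? rank t with
    | none => (t, out')
    | some r => (off.getD c 0 - 1 + r, out')

def twb_alt (b : String) : String :=
  let bl := b.toList
  let p := bl.foldl twbAltPass (PySem.Dict.empty, [])
  let cnt := p.1; let rank := p.2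
  let off := ((PySem.List.sorted cnt.keys (fun x => x) false).foldl
    (twbAltOff cnt) (PySem.Dict.empty, 0)).1
  let res := (PySem.List.pyRange 0 ((bl.length : Int) - 1) 1).foldl
    (twbAltLoop bl rank off) (0, [])
  String.ofList res.2.reverse

-- ===== PRECONDITION & SPEC =====
def Spec_twb (b : String) (out : String) : Prop := out = twb_alt b
instance (b : String) (out : String) : Decidable (Spec_twb b out) := by
  unfold Spec_twb; infer_instance

-- ===== CLAIM (what is proved, stated in full; the proofs are below) =====
def Claim_equal_twb : Prop := ∀ (b : String), Dom_twb b → Spec_twb b (twb b)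

-- ===== LEMMAS AND PROOFS =====
def twbTr (c : Char) : Char := if c ≠ '_' then c else ' '

theorem twb_items_ofList {l : List (Char × Int)} (h : (l.map Prod.fst).Nodup) :
    (PySem.Dict.ofList l).items = l := by
  have : PySem.Dict.ofList l
      = l.foldl (fun d a => d.insert (Prod.fst a) (Prod.snd a)) PySem.Dict.empty := rfl
  rw [this, PySem.Dict.items_foldl_insert_fresh l Prod.fst Prod.snd _ (fun a _ => PySem.Dict.contains_empty _) h]
  simp
  rfl

theorem twb_zip_map_set (char : List Char) (occ : List Int) (i : Nat) (v : Int) (c : Char)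
    (hnd : char.Nodup) (hl : occ.length = char.length) (hi : i < char.length)
    (hc : char[i] = c) :
    (char.zip occ).map (fun p => if p.1 == c then (c, v) else p)
      = char.zip (occ.set i v) := by
  induction char generalizing occ i with
  | nil => simp at hi
  | cons k ct ih =>
    cases occ with
    | nil => simp at hl
    | cons o ot =>
      simp only [List.nodup_cons] at hnd
      cases i with
      | zero =>
        simp only [List.getElem_cons_zero] at hc
        subst hc
        simp only [List.zip_cons_cons, List.map_cons, beq_self_eq_true, if_pos, List.set_cons_zero]
        congr 1
        have : ∀ p ∈ ct.zip ot, (if p.1 == k then (k, v) else p) = p := by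
          intro p hp
          have h1 : p.1 ∈ ct := (List.of_mem_zip hp).1
          rw [if_neg (by simp; intro h; exact hnd.1 (h ▸ h1))]
        rw [List.map_congr_left this]; simp
      | succ j =>
        simp only [List.getElem_cons_succ] at hc
        have hkc : k ≠ c := by
          intro h; subst h
          exact hnd.1 (hc ▸ List.getElem_mem _)
        simp only [List.zip_cons_cons, List.map_cons, List.set_cons_succ]
        rw [if_neg (by simp [hkc])]
        simp at hl hi
        rw [ih ot j hnd.2 hl hi hc]

theorem twb_keys_eq (char : List Char) (occ : List Int) (cnt : PySem.Dict Char Int)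
    (h1 : cnt.items = char.zip occ) (h3 : occ.length = char.length) : cnt.keys = char := by
  have : cnt.keys = cnt.items.map Prod.fst := rfl
  rw [this, h1, List.map_fst_zip (le_of_eq h3.symm)]

theorem twb_pass1 (cs : List Char) (char : List Char) (occ fm : List Int)
    (cnt : PySem.Dict Char Int) (rank : List Int)
    (h1 : cnt.items = char.zip occ) (h2 : char.Nodup) (h3 : occ.length = char.length)
    (h4 : fm = rank) :
    (cs.foldl twbAltPass (cnt, rank)).1.items
        = (cs.foldl twbStep1 (char, occ, fm)).1.zip (cs.foldl twbStep1 (char, occ, fm)).2.1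
    ∧ (cs.foldl twbStep1 (char, occ, fm)).1.Nodup
    ∧ (cs.foldl twbStep1 (char, occ, fm)).2.1.length = (cs.foldl twbStep1 (char, occ, fm)).1.length
    ∧ (cs.foldl twbStep1 (char, occ, fm)).2.2 = (cs.foldl twbAltPass (cnt, rank)).2
    ∧ (∀ x, x ∈ cs ∨ x ∈ char → x ∈ (cs.foldl twbStep1 (char, occ, fm)).1) := by
  induction cs generalizing char occ fm cnt rank with
  | nil =>
    refine ⟨by simpa using h1, h2, h3, h4, ?_⟩
    intro x hx; simpa using hx
  | cons c cs ih =>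
    have hkeys : cnt.keys = char := twb_keys_eq char occ cnt h1 h3
    have hknd : cnt.keys.Nodup := hkeys ▸ h2
    by_cases hmem : c ∈ char
    · -- repeated character
      obtain ⟨i, hidx⟩ := Option.isSome_iff_exists.mp
        ((PySem.List.index?_isSome_iff char c).mpr hmem)
      obtain ⟨hi, hci, -⟩ := PySem.List.getElem_of_index?_eq_some hidx
      have hio : i < occ.length := h3 ▸ hi
      have hcontA : char.contains c = true := by simpa using hmem
      have hcontB : cnt.contains c = true := by
        rw [PySem.Dict.contains_iff_mem_keys, hkeys]; exact hmem
      have hmemit : (c, occ[i]) ∈ cnt.items := by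
        have hz : i < (char.zip occ).length := by rw [List.length_zip]; omega
        have he : (char.zip occ)[i] = (char[i], occ[i]) := List.getElem_zip
        rw [h1, ← hci, ← he]
        exact List.getElem_mem hz
      have hgetD : cnt.getD c 0 = occ[i] := PySem.Dict.getD_of_mem_items cnt hmemit hknd 0
      have hstepA : twbStep1 (char, occ, fm) c
          = (char, occ.set i (occ[i] + 1), fm ++ [occ[i] + 1]) := by
        simp only [twbStep1, hcontA, hidx]
        simp [List.getElem?_eq_getElem hio]
      have hstepB : twbAltPass (cnt, rank) c
          = (cnt.insert c (occ[i] + 1), rank ++ [occ[i] + 1]) := by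
        simp [twbAltPass, hgetD]
      rw [List.foldl_cons, List.foldl_cons, hstepA, hstepB]
      have hins : (cnt.insert c (occ[i] + 1)).items = char.zip (occ.set i (occ[i] + 1)) := by
        rw [PySem.Dict.items_insert_of_contains cnt _ hcontB, h1]
        exact twb_zip_map_set char occ i _ c h2 h3 hi hci
      have := ih char (occ.set i (occ[i] + 1)) (fm ++ [occ[i] + 1])
        (cnt.insert c (occ[i] + 1)) (rank ++ [occ[i] + 1]) hins h2
        (by simp [h3]) (by rw [h4])
      refine ⟨this.1, this.2.1, this.2.2.1, this.2.2.2.1, ?_⟩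
      intro x hx
      apply this.2.2.2.2
      rcases hx with hx | hx
      · rcases List.mem_cons.mp hx with hx | hx
        · exact Or.inr (hx ▸ hmem)
        · exact Or.inl hx
      · exact Or.inr hx
    · -- new character
      have hcontA : char.contains c = false := by simpa using hmem
      have hcontB : cnt.contains c = false := by
        rw [← Bool.not_eq_true, PySem.Dict.contains_iff_mem_keys, hkeys]; exact hmem
      have hgetD : cnt.getD c 0 = 0 := PySem.Dict.getD_of_not_contains cnt 0 hcontB
      have hstepA : twbStep1 (char, occ, fm) c = (char ++ [c], occ ++ [1], fm ++ [1]) := by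
        simp [twbStep1, hmem]
      have hstepB : twbAltPass (cnt, rank) c = (cnt.insert c 1, rank ++ [1]) := by
        simp [twbAltPass, hgetD]
      rw [List.foldl_cons, List.foldl_cons, hstepA, hstepB]
      have hins : (cnt.insert c 1).items = (char ++ [c]).zip (occ ++ [1]) := by
        rw [PySem.Dict.items_insert_of_not_contains cnt _ hcontB, h1, List.zip_append h3.symm]
        rfl
      have := ih (char ++ [c]) (occ ++ [1]) (fm ++ [1]) (cnt.insert c 1) (rank ++ [1]) hins
        (by simp [List.Nodup.append, h2, hmem]) (by simp [h3]) (by rw [h4])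
      refine ⟨this.1, this.2.1, this.2.2.1, this.2.2.2.1, ?_⟩
      intro x hx
      apply this.2.2.2.2
      rcases hx with hx | hx
      · rcases List.mem_cons.mp hx with hx | hx
        · exact Or.inr (by simp [hx])
        · exact Or.inl hx
      · exact Or.inr (by simp [hx])

theorem twb_off_untouched (cnt : PySem.Dict Char Int) (rest : List Char) (c : Char)
    (off : PySem.Dict Char Int) (tot : Int) (h : c ∉ rest) :
    ((rest.foldl (twbAltOff cnt) (off, tot)).1).getD c 0 = off.getD c 0 := by
  induction rest generalizing off tot with
  | nil => rfl
  | cons k r ih =>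
    simp only [List.mem_cons, not_or] at h
    rw [List.foldl_cons]
    rw [ih _ _ h.2]
    exact PySem.Dict.getD_insert_of_ne _ _ _ h.1

theorem twb_scan_eq_off (l : List Char) (c : Char) (cnt cc2 : PySem.Dict Char Int)
    (off0 : PySem.Dict Char Int) (tot acc : Int) (hnd : l.Nodup) (hc : c ∈ l)
    (hg : ∀ k ∈ l, cc2.getD k 0 = cnt.getD k 0) :
    ((l.foldl (twbAltOff cnt) (off0, tot)).1).getD c 0 + acc = twbScan cc2 c l acc + tot := by
  induction l generalizing off0 tot acc with
  | nil => simp at hc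
  | cons k rest ih =>
    simp only [List.nodup_cons] at hnd
    rw [List.foldl_cons]
    by_cases hck : c = k
    · subst hck
      rw [twbScan, if_pos rfl]
      rw [twb_off_untouched cnt rest c _ _ hnd.1]
      simp only [twbAltOff]
      rw [PySem.Dict.getD_insert_self]
      ring
    · rw [twbScan, if_neg hck]
      have hcrest : c ∈ rest := by
        rcases List.mem_cons.mp hc with h | h
        · exact absurd h hck
        · exact h
      rw [hg k List.mem_cons_self]
      have := ih (off0.insert k tot) (tot + cnt.getD k 0) (acc + cnt.getD k 0) hnd.2 hcrest
        (fun x hx => hg x (List.mem_cons_of_mem _ hx))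
      simp only [twbAltOff] at this ⊢
      omega

theorem twb_pyGet?_mem {xs : List Char} {i : Int} {x : Char}
    (h : PySem.List.pyGet? xs i = some x) : x ∈ xs := by
  simp only [PySem.List.pyGet?, PySem.List.pyIdx?] at h
  split at h <;> split at h <;> simp only [Option.bind_some, Option.bind_none] at h <;>
    first
      | exact List.mem_of_getElem? h
      | exact absurd h (by simp)

theorem twb_loops (bl : List Char) (fm rank : List Int) (sc : List Char)
    (cc2 off : PySem.Dict Char Int) (idx : List Int) (t : Int) (s out : List Char)
    (hfm : fm = rank)
    (hstep : ∀ c ∈ bl, twbScan cc2 c sc (-1) = off.getD c 0 - 1)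
    (hout : out = s.map twbTr) :
    (idx.foldl (twbAltLoop bl rank off) (t, out)).1
        = (idx.foldl (twbLoop bl fm sc cc2) (t, s)).1
    ∧ (idx.foldl (twbAltLoop bl rank off) (t, out)).2
        = (idx.foldl (twbLoop bl fm sc cc2) (t, s)).2.map twbTr := by
  subst hfm
  induction idx generalizing t s out with
  | nil => exact ⟨rfl, hout⟩
  | cons j idx ih =>
    rw [List.foldl_cons, List.foldl_cons]
    have htr : ∀ c : Char, (if c = '_' then ' ' else c) = twbTr c := by
      intro c; by_cases h : c = '_' <;> simp [twbTr, h]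
    cases hb : PySem.List.pyGet? bl t with
    | none =>
      simp only [twbLoop, twbAltLoop, hb]
      exact ih t s out hout
    | some c =>
      have hc : c ∈ bl := twb_pyGet?_mem hb
      cases hf : PySem.List.pyGet? fm t with
      | none =>
        simp only [twbLoop, twbAltLoop, hb, hf]
        exact ih t (s ++ [c]) _ (by simp [hout, htr c])
      | some f =>
        simp only [twbLoop, twbAltLoop, hb, hf]
        have : off.getD c 0 - 1 + f = twbScan cc2 c sc (-1) + f := by rw [hstep c hc]
        rw [this]
        exact ih _ (s ++ [c]) _ (by simp [hout, htr c])

theorem twb_main (b : String) : twb b = twb_alt b := by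
  simp only [twb, twb_alt]
  set bl := b.toList with hbl
  obtain ⟨Hitems, Hnd, Hlen, Hfm, Hmem⟩ :=
    twb_pass1 bl [] [] [] PySem.Dict.empty [] (by rfl) (by simp) (by simp) rfl
  set P := bl.foldl twbStep1 ([], [], []) with hP
  set Q := bl.foldl twbAltPass (PySem.Dict.empty, []) with hQ
  -- dict(zip(char, occ)) IS B's counter dict
  have hfst : (P.1.zip P.2.1).map Prod.fst = P.1 := List.map_fst_zip (le_of_eq Hlen.symm)
  have hcc1items : (PySem.Dict.ofList (P.1.zip P.2.1)).items = P.1.zip P.2.1 :=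
    twb_items_ofList (by rw [hfst]; exact Hnd)
  have hcc1 : PySem.Dict.ofList (P.1.zip P.2.1) = Q.1 :=
    PySem.Dict.ext (by rw [hcc1items, Hitems])
  rw [hcc1]
  have hkeys : Q.1.keys = P.1 := twb_keys_eq P.1 P.2.1 Q.1 Hitems Hlen
  set sc := PySem.List.sorted Q.1.keys (fun x => x) false with hsc
  have hscnd : sc.Nodup := ((PySem.List.sorted_perm Q.1.keys _ false).nodup_iff).mpr (hkeys ▸ Hnd)
  -- the rebuilt sorted dict agrees with the counter on every sorted key
  rw [PySem.List.foldl_append_singleton_eq_map (fun v => Q.1.getD v 0) sc []]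
  simp only [List.nil_append]
  set g : Char → Int := fun v => Q.1.getD v 0 with hg
  have hzipmap : sc.zip (sc.map g) = sc.map (fun x => (x, g x)) := by
    have h := @List.zip_map' _ _ _ id g sc
    simpa using h
  have hcc2items : (PySem.Dict.ofList (sc.zip (sc.map g))).items = sc.map (fun x => (x, g x)) := by
    rw [hzipmap]
    exact twb_items_ofList (by
      rw [List.map_map]
      exact (by simpa using hscnd : (sc.map (fun x => (fun p : Char × Int => p.1) (x, g x))).Nodup))
  set cc2 := PySem.Dict.ofList (sc.zip (sc.map g)) with hcc2
  have hcc2keys : cc2.keys = sc := by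
    have : cc2.keys = cc2.items.map Prod.fst := rfl
    rw [this, hcc2items, List.map_map]
    show List.map id sc = sc
    exact List.map_id sc
  have hcc2getD : ∀ k ∈ sc, cc2.getD k 0 = Q.1.getD k 0 := by
    intro k hk
    have hmemit : (k, g k) ∈ cc2.items := by
      rw [hcc2items]; exact List.mem_map_of_mem hk
    exact PySem.Dict.getD_of_mem_items cc2 hmemit (hcc2keys ▸ hscnd) 0
  -- A's while-scan equals B's offset lookup
  have hstep : ∀ c ∈ bl, twbScan cc2 c sc (-1)
      = ((sc.foldl (twbAltOff Q.1) (PySem.Dict.empty, 0)).1).getD c 0 - 1 := by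
    intro c hc
    have hcsc : c ∈ sc := by
      rw [hsc, PySem.List.mem_sorted, hkeys]
      exact Hmem c (Or.inl hc)
    have := twb_scan_eq_off sc c Q.1 cc2 PySem.Dict.empty 0 (-1) hscnd hcsc hcc2getD
    omega
  obtain ⟨-, h2⟩ := twb_loops bl P.2.2 Q.2 sc cc2
    ((sc.foldl (twbAltOff Q.1) (PySem.Dict.empty, 0)).1)
    (PySem.List.pyRange 0 ((bl.length : Int) - 1) 1) 0 [] [] Hfm hstep (by simp)
  set resA := (PySem.List.pyRange 0 ((bl.length : Int) - 1) 1).foldl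
    (twbLoop bl P.2.2 sc cc2) (0, []) with hresA
  set resB := (PySem.List.pyRange 0 ((bl.length : Int) - 1) 1).foldl
    (twbAltLoop bl Q.2 ((sc.foldl (twbAltOff Q.1) (PySem.Dict.empty, 0)).1)) (0, []) with hresB
  -- the translate loop is map twbTr, and [::-1] is reverse
  have hbody : (fun (acc : List Char) (i : Int) =>
      if PySem.List.pyGetD resA.2 i ' ' ≠ '_' then acc ++ [PySem.List.pyGetD resA.2 i ' ']
      else acc ++ [' '])
      = fun acc i => acc ++ [twbTr (PySem.List.pyGetD resA.2 i ' ')] := by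
    funext acc i
    by_cases h : PySem.List.pyGetD resA.2 i ' ' = '_' <;> simp [twbTr, h]
  rw [hbody, PySem.List.foldl_append_singleton_eq_map (fun i => twbTr (PySem.List.pyGetD resA.2 i ' '))]
  have htrans : List.map (fun i => twbTr (PySem.List.pyGetD resA.2 i ' '))
      (PySem.List.pyRange 0 (resA.2.length : Int) 1) = resA.2.map twbTr := by
    have h0 := PySem.List.map_pyGetD_pyRange_zero resA.2 ' '
    simp only [PySem.List.len] at h0
    rw [show (fun i => twbTr (PySem.List.pyGetD resA.2 i ' '))
        = twbTr ∘ (fun i => PySem.List.pyGetD resA.2 i ' ') from rfl]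
    rw [← List.map_map, h0]
  rw [List.nil_append, htrans, PySem.List.slice?_none_none_neg_one]
  rw [← h2]
  rfl

-- ===== VERDICT (by name: the statement is the Claim_ definition above) =====
theorem twb_spec : Claim_equal_twb := by
  intro b _
  unfold Spec_twb
  exact twb_main b
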